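-- pv_equiv track=rewrite | github.com/adiseal/edabit-practices | RobotZZZ.py | robot_path
-- ===== SOURCE A (Python) =====
-- def robot_path(commands):
--     destination1 = ["e", "n", "e", "e", "n"]
--     destination2 = ["w", "n", "w", "n", "w", "w", "n"]
--
--     def final_position(commands):
--         x, y = 0, 0
--         for command in commands:
--             if command == "n":
--                 y += 1
--             elif command == "e":
--                 x += 1
--             elif command == "s":
--                 y -= 1
--             elif command == "w":
--                 x -= 1
--         return (x, y)
--
--     final_pos = final_position(commands)
--     final_pos_dest1 = final_position(destination1)
--     final_pos_dest2 = final_position(destination2)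
--
--     return final_pos == final_pos_dest1 or final_pos == final_pos_dest2
-- ===== SOURCE B (Python) =====
-- def robot_path(commands):
--     # Instead of simulating the robot forward, drag the two goal squares backwards:
--     # each command shifts every goal by the inverse move, and the walk succeeds
--     # iff some goal ends up exactly on the origin.
--     UNDO = {"n": (0, -1), "s": (0, 1), "e": (-1, 0), "w": (1, 0)}
--     goals = [(3, 2), (-4, 3)]
--     for c in commands:
--         dx, dy = UNDO.get(c, (0, 0))
--         goals = [(gx + dx, gy + dy) for gx, gy in goals]
--     return (0, 0) in goals
-- ===== Notes on version B (the rewrite author's own statement) =====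
-- stated objective: alternative
-- what changed: Inverts the viewpoint: instead of simulating the robot forward from the origin (and re-simulating both destination walks), B drags the two goal coordinates backwards by the inverse of each command via a delta table and answers whether a goal lands on the origin.
import Mathlib
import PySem

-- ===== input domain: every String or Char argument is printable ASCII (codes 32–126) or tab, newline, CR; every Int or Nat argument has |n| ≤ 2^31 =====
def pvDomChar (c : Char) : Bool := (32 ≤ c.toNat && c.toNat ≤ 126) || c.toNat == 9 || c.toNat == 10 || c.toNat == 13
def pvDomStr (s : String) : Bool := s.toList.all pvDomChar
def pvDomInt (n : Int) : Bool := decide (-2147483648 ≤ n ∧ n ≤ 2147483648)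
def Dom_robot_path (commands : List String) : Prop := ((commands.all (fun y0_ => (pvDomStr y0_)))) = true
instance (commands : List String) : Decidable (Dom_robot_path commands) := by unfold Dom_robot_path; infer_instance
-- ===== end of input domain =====

-- B inverts the viewpoint: instead of simulating the robot (and both destination walks)
-- forward from the origin, it drags the two goal squares backwards by the inverse of each
-- command (delta table) and answers whether a goal lands on the origin.

-- ===== PORT A =====
-- the inner helper final_position: branch loop over the commands
def robot_path_finalPosition (commands : List String) : Int × Int :=
  commands.foldl (fun (p : Int × Int) command =>
    if command = "n" then (p.1, p.2 + 1)
    else if command = "e" then (p.1 + 1, p.2)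
    else if command = "s" then (p.1, p.2 - 1)
    else if command = "w" then (p.1 - 1, p.2)
    else p) (0, 0)

def robot_path (commands : List String) : Bool :=
  let destination1 := ["e", "n", "e", "e", "n"]
  let destination2 := ["w", "n", "w", "n", "w", "w", "n"]
  let final_pos := robot_path_finalPosition commands
  let final_pos_dest1 := robot_path_finalPosition destination1
  let final_pos_dest2 := robot_path_finalPosition destination2
  (final_pos == final_pos_dest1) || (final_pos == final_pos_dest2)

-- ===== PORT B =====
def robot_path_UNDO : PySem.Dict String (Int × Int) :=
  PySem.Dict.ofList [("n", (0, -1)), ("s", (0, 1)), ("e", (-1, 0)), ("w", (1, 0))]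

def robot_path_alt (commands : List String) : Bool :=
  let goals : List (Int × Int) :=
    commands.foldl (fun goals c =>
      let d := robot_path_UNDO.getD c (0, 0)
      goals.map (fun g => (g.1 + d.1, g.2 + d.2)))
    [(3, 2), (-4, 3)]
  goals.contains ((0 : Int), (0 : Int))

-- ===== PRECONDITION & SPEC =====
def Spec_robot_path (commands : List String) (out : Bool) : Prop := out = robot_path_alt commands
instance (commands : List String) (out : Bool) : Decidable (Spec_robot_path commands out) := by unfold Spec_robot_path; infer_instance

-- ===== CLAIM (what is proved, stated in full; the proofs are below) =====
def Claim_equal_robot_path : Prop := ∀ (commands : List String), Dom_robot_path commands → Spec_robot_path commands (robot_path commands)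

-- ===== LEMMAS AND PROOFS =====

-- A's accumulator loop, generalized: the fold computes the start plus the net letter counts.
theorem robot_path_finalPosition_eq (commands : List String) :
    robot_path_finalPosition commands =
      ((commands.count "e" : Int) - (commands.count "w" : Int),
       (commands.count "n" : Int) - (commands.count "s" : Int)) := by
  unfold robot_path_finalPosition
  suffices h : ∀ (l : List String) (a b : Int),
      l.foldl (fun (p : Int × Int) command =>
        if command = "n" then (p.1, p.2 + 1)
        else if command = "e" then (p.1 + 1, p.2)
        else if command = "s" then (p.1, p.2 - 1)
        else if command = "w" then (p.1 - 1, p.2)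
        else p) (a, b) =
      (a + (l.count "e" : Int) - (l.count "w" : Int),
       b + (l.count "n" : Int) - (l.count "s" : Int)) by
    simpa using h commands 0 0
  intro l
  induction l with
  | nil => intro a b; simp
  | cons h t ih =>
    intro a b
    rw [List.foldl_cons]
    by_cases h1 : h = "n"
    · subst h1; simp only [if_pos]
      simp [ih, Prod.ext_iff]; omega
    by_cases h2 : h = "e"
    · subst h2; simp only [if_neg (by decide : ¬("e" : String) = "n")]
      simp [ih, Prod.ext_iff]; omega
    by_cases h3 : h = "s"
    · subst h3
      simp only [if_neg (by decide : ¬("s" : String) = "n"),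
                 if_neg (by decide : ¬("s" : String) = "e")]
      simp [ih, Prod.ext_iff]; omega
    by_cases h4 : h = "w"
    · subst h4
      simp only [if_neg (by decide : ¬("w" : String) = "n"),
                 if_neg (by decide : ¬("w" : String) = "e"),
                 if_neg (by decide : ¬("w" : String) = "s")]
      simp [ih, Prod.ext_iff]; omega
    · simp only [if_neg h1, if_neg h2, if_neg h3, if_neg h4]
      simp [ih, h1, h2, h3, h4]

-- B's goal-dragging loop: every goal ends shifted by minus the net letter counts.
theorem robot_path_UNDO_n : robot_path_UNDO.getD "n" ((0:Int),(0:Int)) = ((0:Int),(-1:Int)) := by decide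
theorem robot_path_UNDO_s : robot_path_UNDO.getD "s" ((0:Int),(0:Int)) = ((0:Int),(1:Int)) := by decide
theorem robot_path_UNDO_e : robot_path_UNDO.getD "e" ((0:Int),(0:Int)) = ((-1:Int),(0:Int)) := by decide
theorem robot_path_UNDO_w : robot_path_UNDO.getD "w" ((0:Int),(0:Int)) = ((1:Int),(0:Int)) := by decide

theorem robot_path_UNDO_other (c : String) (h1 : c ≠ "n") (h2 : c ≠ "e") (h3 : c ≠ "s") (h4 : c ≠ "w") :
    robot_path_UNDO.getD c ((0:Int),(0:Int)) = ((0:Int),(0:Int)) := by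
  have hc : robot_path_UNDO.contains c = false := by
    rw [PySem.Dict.contains_eq_decide_mem_keys,
        (by decide : robot_path_UNDO.keys = ["n", "s", "e", "w"])]
    simp [h1, h2, h3, h4]
  exact PySem.Dict.getD_of_not_contains _ _ hc

-- B's goal-dragging loop: every goal ends shifted by minus the net letter counts.
theorem robot_path_goals_eq (l : List String) (g : List (Int × Int)) :
    l.foldl (fun goals c =>
      let d := robot_path_UNDO.getD c (0, 0)
      goals.map (fun g => (g.1 + d.1, g.2 + d.2))) g =
    g.map (fun q => (q.1 - ((l.count "e" : Int) - (l.count "w" : Int)),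
                     q.2 - ((l.count "n" : Int) - (l.count "s" : Int)))) := by
  induction l generalizing g with
  | nil => simp
  | cons c t ih =>
    rw [List.foldl_cons, ih, List.map_map]
    refine List.map_congr_left (fun q _ => ?_)
    by_cases h1 : c = "n"
    · subst h1; simp [robot_path_UNDO_n, Prod.ext_iff]; omega
    by_cases h2 : c = "e"
    · subst h2; simp [robot_path_UNDO_e, Prod.ext_iff]; omega
    by_cases h3 : c = "s"
    · subst h3; simp [robot_path_UNDO_s, Prod.ext_iff]; omega
    by_cases h4 : c = "w"
    · subst h4; simp [robot_path_UNDO_w, Prod.ext_iff]; omega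
    · simp [robot_path_UNDO_other c h1 h2 h3 h4, h1, h2, h3, h4]

-- ===== VERDICT (by name: the statement is the Claim_ definition above) =====
theorem robot_path_spec : Claim_equal_robot_path := by
  intro commands _
  show robot_path commands = robot_path_alt commands
  unfold robot_path robot_path_alt
  rw [robot_path_goals_eq]
  simp only [robot_path_finalPosition_eq]
  rw [Bool.eq_iff_iff]
  simp [Prod.ext_iff]
  omega
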